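-- pv_equiv track=rewrite | github.com/Gwilhoa/minshell | headers.py | tab_len
-- ===== SOURCE A (Python) =====
-- def tab_len(str):
--     i = 0
--     for char in str:
--         if char == '\t':
--             i += 4 - (i % 4)
--             continue
--         i += 1
--     return i
-- ===== SOURCE B (Python) =====
-- def tab_len(str):
--     parts = str.split('\t')
--     i = len(parts[0])
--     for seg in parts[1:]:
--         i += 4 - (i % 4) + len(seg)
--     return i
-- ===== Notes on version B (the rewrite author's own statement) =====
-- stated objective: alternative
-- what changed: B splits the string on tabs once and jumps chunk by chunk (length of segment, then next tab stop) instead of A's per-character scan with an if per character.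
import Mathlib
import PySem

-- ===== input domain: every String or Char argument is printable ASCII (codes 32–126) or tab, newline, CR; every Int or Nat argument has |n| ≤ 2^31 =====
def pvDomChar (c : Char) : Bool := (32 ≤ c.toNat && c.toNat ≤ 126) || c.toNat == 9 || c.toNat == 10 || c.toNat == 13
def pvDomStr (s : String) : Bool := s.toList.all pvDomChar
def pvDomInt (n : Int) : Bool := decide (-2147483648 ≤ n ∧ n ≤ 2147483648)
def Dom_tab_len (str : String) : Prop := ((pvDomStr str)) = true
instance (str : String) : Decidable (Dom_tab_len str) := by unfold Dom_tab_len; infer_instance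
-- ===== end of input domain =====

-- B splits the string on tabs once and jumps chunk by chunk (next tab stop + segment length) instead of A's per-character scan; alternative decomposition, same cost.

-- ===== PORT A =====
def tab_len (str : String) : Int :=
  str.toList.foldl (fun i char => if char = '\t' then i + (4 - PySem.Int.mod i 4) else i + 1) 0

-- ===== PORT B =====
def tab_len_alt (str : String) : Int :=
  match str.toList.splitOn '\t' with
  | [] => 0  -- unreachable: str.split never returns an empty list
  | p0 :: rest =>
      rest.foldl (fun i seg => i + (4 - PySem.Int.mod i 4) + (seg.length : Int)) (p0.length : Int)

-- ===== PRECONDITION & SPEC =====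
def Spec_tab_len (str : String) (out : Int) : Prop := out = tab_len_alt str
instance (str : String) (out : Int) : Decidable (Spec_tab_len str out) := by unfold Spec_tab_len; infer_instance

-- ===== CLAIM (what is proved, stated in full; the proofs are below) =====
def Claim_equal_tab_len : Prop := ∀ (str : String), Dom_tab_len str → Spec_tab_len str (tab_len str)

-- ===== LEMMAS AND PROOFS =====

theorem tab_len_key (cs : List Char) (i : Int) :
    cs.foldl (fun i char => if char = '\t' then i + (4 - PySem.Int.mod i 4) else i + 1) i =
      match cs.splitOn '\t' with
      | [] => i
      | p0 :: rest =>
          rest.foldl (fun i seg => i + (4 - PySem.Int.mod i 4) + (seg.length : Int))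
            (i + (p0.length : Int)) := by
  induction cs generalizing i with
  | nil => simp [List.splitOn]
  | cons c cs ih =>
    rcases h : cs.splitOnP (· == '\t') with _ | ⟨p0, rest⟩
    · exact absurd h (List.splitOnP_ne_nil _ _)
    · by_cases hc : c = '\t'
      · subst hc
        simp only [List.foldl_cons, ih, List.splitOn, List.splitOnP_cons, h]
        simp [List.foldl_cons]
      · simp only [List.foldl_cons, ih, List.splitOn, List.splitOnP_cons, h,
          beq_iff_eq, if_neg hc, List.modifyHead]
        congr 1
        simp only [List.length_cons]
        push_cast
        ring

-- ===== VERDICT (by name: the statement is the Claim_ definition above) =====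
theorem tab_len_spec : Claim_equal_tab_len := by
  intro s _
  unfold Spec_tab_len tab_len tab_len_alt
  have := tab_len_key s.toList 0
  rcases h : s.toList.splitOn '\t' with _ | ⟨p0, rest⟩
  · exact absurd h (by simpa [List.splitOn] using List.splitOnP_ne_nil (· == '\t') s.toList)
  · rw [h] at this; simpa using this
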